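-- pv_equiv track=rewrite | github.com/ProhibitedTV/ChoomLang | src/choomlang/protocol.py | iter_script_lines
-- ===== SOURCE A (Python) =====
-- def strip_inline_comment(line: str) -> str:
--     """Strip comments that start with unquoted '#'."""
--     in_quote = False
--     escape = False
--     for i, ch in enumerate(line):
--         if in_quote:
--             if escape:
--                 escape = False
--             elif ch == "\\":
--                 escape = True
--             elif ch == '"':
--                 in_quote = False
--             continue
--
--         if ch == '"':
--             in_quote = True
--             continue
--
--         if ch == "#":
--             return line[:i].rstrip()
--
--     return line.rstrip()
--
-- def iter_script_lines(text: str) -> list[tuple[int, str]]: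
--     """Return parseable script lines as (line_number, dsl_text)."""
--     rows: list[tuple[int, str]] = []
--     for line_number, raw in enumerate(text.splitlines(), start=1):
--         stripped = raw.strip()
--         if not stripped or stripped.startswith("#"):
--             continue
--         without_comment = strip_inline_comment(raw).strip()
--         if not without_comment:
--             continue
--         rows.append((line_number, without_comment))
--     return rows
-- ===== SOURCE B (Python) =====
-- def _code_part(line: str) -> str:
--     """Prefix of line before the first '#' that is outside double quotes
--     (token scan: a quoted section is skipped in one inner loop, with
--     backslash escapes consuming two characters)."""
--     i, n = 0, len(line)
--     while i < n:
--         ch = line[i]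
--         if ch == "#":
--             return line[:i]
--         if ch == '"':
--             i += 1
--             while i < n and line[i] != '"':
--                 i += 2 if line[i] == "\\" else 1
--         i += 1
--     return line
--
--
-- def iter_script_lines(text: str) -> list[tuple[int, str]]:
--     """Return parseable script lines as (line_number, dsl_text)."""
--     rows: list[tuple[int, str]] = []
--     for line_number, raw in enumerate(text.splitlines(), start=1):
--         code = _code_part(raw).strip()
--         if code:
--             rows.append((line_number, code))
--     return rows
-- ===== Notes on version B (the rewrite author's own statement) =====
-- stated objective: simpler
-- what changed: Replaces the per-character in_quote/escape boolean state machine with a token-consuming scan (an inner loop skips a whole quoted section at once, escapes advancing two characters) and drops the now-redundant blank/comment-first pre-filter, leaving a single keep-if-nonempty test per line.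
import Mathlib
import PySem

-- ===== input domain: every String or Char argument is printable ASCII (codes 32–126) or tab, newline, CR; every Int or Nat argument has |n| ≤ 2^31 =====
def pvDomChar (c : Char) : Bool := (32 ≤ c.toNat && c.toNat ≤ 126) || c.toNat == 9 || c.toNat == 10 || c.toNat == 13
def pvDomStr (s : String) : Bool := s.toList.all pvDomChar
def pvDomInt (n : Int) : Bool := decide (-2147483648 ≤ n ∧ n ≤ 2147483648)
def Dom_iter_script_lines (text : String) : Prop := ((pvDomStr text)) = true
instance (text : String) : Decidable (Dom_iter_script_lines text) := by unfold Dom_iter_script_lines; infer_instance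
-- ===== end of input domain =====

-- B replaces A's per-character in_quote/escape flag machine by a token-consuming scan
-- (an inner loop skips a whole quoted section) and drops A's redundant pre-filter of
-- blank/comment-first lines (objective: simpler); same return value on every input.

-- ===== PORT A =====
-- A's for-loop over enumerate(line) with state (in_quote, escape); early return at an
-- unquoted '#'. line[:i] is PySem.List.slice.
def strip_inline_comment_go (line rest : List Char) (i : Nat) (in_quote escape : Bool) : List Char :=
  match rest with
  | [] => PySem.Chars.rstrip line
  | ch :: rs =>
    if in_quote then
      if escape then strip_inline_comment_go line rs (i + 1) in_quote false
      else if ch = '\\' then strip_inline_comment_go line rs (i + 1) in_quote true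
      else if ch = '"' then strip_inline_comment_go line rs (i + 1) false escape
      else strip_inline_comment_go line rs (i + 1) in_quote escape
    else if ch = '"' then strip_inline_comment_go line rs (i + 1) true escape
    else if ch = '#' then PySem.Chars.rstrip (PySem.List.slice line none (some (i : Int)))
    else strip_inline_comment_go line rs (i + 1) in_quote escape

def strip_inline_comment (line : List Char) : List Char :=
  strip_inline_comment_go line line 0 false false

def iter_script_lines (text : String) : List (Int × String) :=
  (((PySem.Chars.splitlines text.toList).foldl
      (fun (st : Int × List (Int × String)) raw =>
        let stripped := PySem.Chars.strip raw
        if stripped.isEmpty || PySem.Chars.startswith stripped ['#'] then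
          (st.1 + 1, st.2)
        else
          let without_comment := PySem.Chars.strip (strip_inline_comment raw)
          if without_comment.isEmpty then (st.1 + 1, st.2)
          else (st.1 + 1, st.2 ++ [(st.1, String.ofList without_comment)]))
      (1, [])).2)

-- ===== PORT B =====
-- B's outer while loop (code_part_go) and its inner quote-skipping loop (code_part_skip);
-- a backslash inside quotes consumes two characters at once.
mutual
def code_part_go (line rest : List Char) (i : Nat) : List Char :=
  match rest with
  | [] => line
  | ch :: rs =>
    if ch = '#' then PySem.List.slice line none (some (i : Int))
    else if ch = '"' then code_part_skip line rs (i + 1)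
    else code_part_go line rs (i + 1)

def code_part_skip (line rest : List Char) (i : Nat) : List Char :=
  match rest with
  | [] => line
  | ch :: rs =>
    if ch = '"' then code_part_go line rs (i + 1)
    else if ch = '\\' then
      match rs with
      | [] => line
      | _ :: rs' => code_part_skip line rs' (i + 2)
    else code_part_skip line rs (i + 1)
end

def code_part (line : List Char) : List Char :=
  code_part_go line line 0

def iter_script_lines_alt (text : String) : List (Int × String) :=
  (((PySem.Chars.splitlines text.toList).foldl
      (fun (st : Int × List (Int × String)) raw =>
        let code := PySem.Chars.strip (code_part raw)
        (st.1 + 1, if code.isEmpty then st.2 else st.2 ++ [(st.1, String.ofList code)]))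
      (1, [])).2)

-- ===== PRECONDITION & SPEC =====
def Spec_iter_script_lines (text : String) (out : List (Int × String)) : Prop := out = iter_script_lines_alt text
instance (text : String) (out : List (Int × String)) : Decidable (Spec_iter_script_lines text out) := by unfold Spec_iter_script_lines; infer_instance

-- ===== CLAIM (what is proved, stated in full; the proofs are below) =====
def Claim_equal_iter_script_lines : Prop := ∀ (text : String), Dom_iter_script_lines text → Spec_iter_script_lines text (iter_script_lines text)

-- ===== LEMMAS AND PROOFS =====

theorem rstrip_nil_iff (x : List Char) :
    PySem.Chars.rstrip x = [] ↔ ∀ c ∈ x, PySem.Chars.isspace c = true := by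
  simp [PySem.Chars.rstrip, List.dropWhile_eq_nil_iff]

theorem rstrip_cons (c : Char) (t : List Char) :
    PySem.Chars.rstrip (c :: t) =
      if PySem.Chars.rstrip t = [] then
        (if PySem.Chars.isspace c then [] else [c])
      else c :: PySem.Chars.rstrip t := by
  by_cases h : List.dropWhile PySem.Chars.isspace t.reverse = []
  · by_cases hc : PySem.Chars.isspace c <;>
      simp [PySem.Chars.rstrip, List.dropWhile_append, h, List.dropWhile, hc]
  · simp [PySem.Chars.rstrip, List.dropWhile_append, h, List.isEmpty_iff]

theorem strip_nil_iff (x : List Char) :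
    PySem.Chars.strip x = [] ↔ ∀ c ∈ x, PySem.Chars.isspace c = true := by
  rw [PySem.Chars.strip, rstrip_nil_iff]
  constructor
  · intro h c hc
    rw [← List.takeWhile_append_dropWhile (p := PySem.Chars.isspace) (l := x)] at hc
    rcases List.mem_append.mp hc with h1 | h1
    · exact List.mem_takeWhile_imp h1
    · exact h c h1
  · intro h c hc
    exact h c ((List.dropWhile_suffix _).subset hc)

theorem rstrip_idem (x : List Char) :
    PySem.Chars.rstrip (PySem.Chars.rstrip x) = PySem.Chars.rstrip x := by
  simp [PySem.Chars.rstrip, List.dropWhile_idempotent]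

theorem lstrip_cons (c : Char) (t : List Char) :
    PySem.Chars.lstrip (c :: t) =
      if PySem.Chars.isspace c then PySem.Chars.lstrip t else c :: t := by
  simp [PySem.Chars.lstrip, List.dropWhile_cons]

theorem lstrip_rstrip_comm (x : List Char) :
    PySem.Chars.lstrip (PySem.Chars.rstrip x) = PySem.Chars.rstrip (PySem.Chars.lstrip x) := by
  induction x with
  | nil => rfl
  | cons c t ih =>
    rw [rstrip_cons, lstrip_cons]
    by_cases ht : PySem.Chars.rstrip t = []
    · by_cases hc : PySem.Chars.isspace c
      · rw [if_pos ht, if_pos hc, if_pos hc, ← ih, ht]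
      · rw [if_pos ht, if_neg hc, if_neg hc, lstrip_cons, if_neg hc, rstrip_cons, if_pos ht,
          if_neg hc]
    · by_cases hc : PySem.Chars.isspace c
      · rw [if_neg ht, if_pos hc, lstrip_cons, if_pos hc, ih]
      · rw [if_neg ht, if_neg hc, lstrip_cons, if_neg hc, rstrip_cons, if_neg ht]

theorem strip_rstrip (x : List Char) :
    PySem.Chars.strip (PySem.Chars.rstrip x) = PySem.Chars.strip x := by
  rw [PySem.Chars.strip, PySem.Chars.strip, lstrip_rstrip_comm, rstrip_idem]

theorem rstrip_prefix (x : List Char) : PySem.Chars.rstrip x <+: x := by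
  rw [PySem.Chars.rstrip, ← List.reverse_reverse x]
  exact List.reverse_suffix.mp
    (by simpa using List.dropWhile_suffix (l := x.reverse) PySem.Chars.isspace)

theorem cpg_cons (line : List Char) (ch : Char) (rs : List Char) (i : Nat) :
    code_part_go line (ch :: rs) i =
      if ch = '#' then PySem.List.slice line none (some (i : Int))
      else if ch = '"' then code_part_skip line rs (i + 1)
      else code_part_go line rs (i + 1) := by
  rw [code_part_go.eq_def]

-- A's state machine computes the rstrip of B's code_part (same cut index), in each phase.
theorem sic_cons (line : List Char) (ch : Char) (rs : List Char) (i : Nat) (inq esc : Bool) :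
    strip_inline_comment_go line (ch :: rs) i inq esc =
      if inq then
        (if esc then strip_inline_comment_go line rs (i + 1) inq false
         else if ch = '\\' then strip_inline_comment_go line rs (i + 1) inq true
         else if ch = '"' then strip_inline_comment_go line rs (i + 1) false esc
         else strip_inline_comment_go line rs (i + 1) inq esc)
      else if ch = '"' then strip_inline_comment_go line rs (i + 1) true esc
      else if ch = '#' then PySem.Chars.rstrip (PySem.List.slice line none (some (i : Int)))
      else strip_inline_comment_go line rs (i + 1) inq esc := by
  rw [strip_inline_comment_go.eq_def]

theorem cps_cons (line : List Char) (ch : Char) (rs : List Char) (i : Nat) :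
    code_part_skip line (ch :: rs) i =
      if ch = '"' then code_part_go line rs (i + 1)
      else if ch = '\\' then
        (match rs with | [] => line | _ :: rs' => code_part_skip line rs' (i + 2))
      else code_part_skip line rs (i + 1) := by
  rw [code_part_skip.eq_def]

-- A's state machine computes the rstrip of B's code_part (same cut index), in each phase.
theorem sic_eq_cp : ∀ (n : Nat) (rest line : List Char), rest.length ≤ n → ∀ (i : Nat),
    strip_inline_comment_go line rest i false false = PySem.Chars.rstrip (code_part_go line rest i) ∧
    strip_inline_comment_go line rest i true false = PySem.Chars.rstrip (code_part_skip line rest i) := by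
  intro n
  induction n with
  | zero =>
    intro rest line h i
    have : rest = [] := List.eq_nil_of_length_eq_zero (Nat.le_zero.mp h)
    subst this
    constructor
    · rfl
    · rw [code_part_skip.eq_def]; rfl
  | succ n ih =>
    intro rest line h i
    cases rest with
    | nil =>
      constructor
      · rfl
      · rw [code_part_skip.eq_def]; rfl
    | cons ch rs =>
      have hrs : rs.length ≤ n := by simp at h; omega
      refine ⟨?_, ?_⟩
      · -- outer phase: not inside a quote
        rw [sic_cons, cpg_cons]
        simp only [Bool.false_eq_true, if_false]
        by_cases hq : ch = '"'
        · subst hq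
          simp only [reduceIte]
          exact (ih rs line hrs (i + 1)).2
        · by_cases hh : ch = '#'
          · subst hh
            rw [if_neg hq]
            simp only [reduceIte]
          · simp only [if_neg hq, if_neg hh]
            exact (ih rs line hrs (i + 1)).1
      · -- inside a quote, no escape pending
        rw [sic_cons, cps_cons]
        simp only [Bool.false_eq_true, if_false, if_true]
        by_cases hq : ch = '"'
        · subst hq
          simp only [reduceIte]
          exact (ih rs line hrs (i + 1)).1
        · by_cases hb : ch = '\\'
          · subst hb
            simp only [reduceIte]
            cases rs with
            | nil =>
              show PySem.Chars.rstrip line = _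
              rfl
            | cons c rs' =>
              have hrs' : rs'.length ≤ n := by simp at hrs ⊢; omega
              rw [sic_cons]
              simp only [reduceIte]
              exact (ih rs' line hrs' (i + 1 + 1)).2
          · simp only [if_neg hq, if_neg hb]
            exact (ih rs line hrs (i + 1)).2

-- B's outer loop walks straight over a whitespace-only rest
theorem cp_go_ws : ∀ (ws : List Char), (∀ c ∈ ws, PySem.Chars.isspace c = true) →
    ∀ (line : List Char) (i : Nat), code_part_go line ws i = line := by
  intro ws
  induction ws with
  | nil => intro _ line i; simp [code_part_go]
  | cons c t ih =>
    intro h line i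
    have hc := h c (by simp)
    have h1 : ¬ c = '#' := by rintro rfl; simp [PySem.Chars.isspace] at hc
    have h2 : ¬ c = '"' := by rintro rfl; simp [PySem.Chars.isspace] at hc
    simp only [code_part_go, if_neg h1, if_neg h2]
    exact ih (fun d hd => h d (by simp [hd])) line (i + 1)

-- … and cuts at a '#' that only whitespace precedes
theorem cp_go_ws_hash : ∀ (ws : List Char), (∀ c ∈ ws, PySem.Chars.isspace c = true) →
    ∀ (line t : List Char) (i : Nat),
      code_part_go line (ws ++ '#' :: t) i = List.take (i + ws.length) line := by
  intro ws
  induction ws with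
  | nil =>
    intro _ line t i
    simp [code_part_go, PySem.List.slice_to line (Int.natCast_nonneg i)]
  | cons c w ih =>
    intro h line t i
    have hc := h c (by simp)
    have h1 : ¬ c = '#' := by rintro rfl; simp [PySem.Chars.isspace] at hc
    have h2 : ¬ c = '"' := by rintro rfl; simp [PySem.Chars.isspace] at hc
    simp only [List.cons_append, code_part_go, if_neg h1, if_neg h2]
    rw [ih (fun d hd => h d (by simp [hd])) line t (i + 1)]
    congr 1
    simp
    omega

-- the per-line step functions of the two folds agree
theorem step_eq (st : Int × List (Int × String)) (raw : List Char) :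
    (let stripped := PySem.Chars.strip raw
     if stripped.isEmpty || PySem.Chars.startswith stripped ['#'] then
       (st.1 + 1, st.2)
     else
       let without_comment := PySem.Chars.strip (strip_inline_comment raw)
       if without_comment.isEmpty then (st.1 + 1, st.2)
       else (st.1 + 1, st.2 ++ [(st.1, String.ofList without_comment)])) =
    (let code := PySem.Chars.strip (code_part raw)
     (st.1 + 1, if code.isEmpty then st.2 else st.2 ++ [(st.1, String.ofList code)])) := by
  have hsc : PySem.Chars.strip (strip_inline_comment raw)
      = PySem.Chars.strip (code_part raw) := by
    rw [strip_inline_comment, code_part,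
        (sic_eq_cp raw.length raw raw le_rfl 0).1, strip_rstrip]
  by_cases h0 : PySem.Chars.strip raw = []
  · -- blank line: B's code part is the blank line itself
    have hall : ∀ c ∈ raw, PySem.Chars.isspace c = true := (strip_nil_iff raw).mp h0
    have hcode : PySem.Chars.strip (code_part raw) = [] := by
      rw [code_part, cp_go_ws raw hall raw 0]; exact h0
    simp [h0, hcode]
  · by_cases h1 : PySem.Chars.startswith (PySem.Chars.strip raw) ['#'] = true
    · -- comment-first line: B cuts it down to its whitespace prefix, blank after strip
      have hpre : ['#'] <+: PySem.Chars.lstrip raw :=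
        List.IsPrefix.trans ((PySem.Chars.startswith_iff _ _).mp h1) (rstrip_prefix _)
      obtain ⟨t, ht⟩ := hpre
      have hlt : List.dropWhile PySem.Chars.isspace raw = '#' :: t := ht.symm
      have hsplit : raw = raw.takeWhile PySem.Chars.isspace ++ '#' :: t := by
        conv_lhs => rw [← List.takeWhile_append_dropWhile (p := PySem.Chars.isspace) (l := raw)]
        rw [hlt]
      have hws : ∀ c ∈ raw.takeWhile PySem.Chars.isspace, PySem.Chars.isspace c = true :=
        fun c hc => List.mem_takeWhile_imp hc
      have hcode : PySem.Chars.strip (code_part raw) = [] := by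
        rw [code_part]
        conv_lhs => rw [hsplit]
        rw [cp_go_ws_hash _ hws, Nat.zero_add, List.take_left, strip_nil_iff]
        exact hws
      simp [h1, hcode]
    · -- code line: both sides keep strip of the cut line
      by_cases hcode : PySem.Chars.strip (code_part raw) = [] <;>
        simp [h0, h1, hsc, hcode]

-- ===== VERDICT (by name: the statement is the Claim_ definition above) =====
theorem iter_script_lines_spec : Claim_equal_iter_script_lines := by
  intro text _
  unfold Spec_iter_script_lines iter_script_lines iter_script_lines_alt
  congr 1
  apply List.foldl_ext
  intro st raw _
  exact step_eq st raw
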